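-- pv_equiv track=rewrite | github.com/vamsiraju22/DSA | Hackerrank.py | totalbits
-- ===== SOURCE A (Python) =====
-- def totalbits(num):
--         count=0
--         n=num
--         setbits=0
--         unsetbits=0
--         while n>0:
--             if n&1 == 1:
--                 setbits+= n&1
--             else:
--                 unsetbits+=1
--             n=n>>1
--         return(setbits,unsetbits)
-- ===== SOURCE B (Python) =====
-- def totalbits(num):
--     if num <= 0:
--         return (0, 0)
--     n = num
--     setbits = 0
--     while n > 0:
--         n &= n - 1
--         setbits += 1
--     return (setbits, num.bit_length() - setbits)
-- ===== Notes on version B (the rewrite author's own statement) =====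
-- stated objective: alternative
-- what changed: Replaces the per-bit scan that classifies every bit as set/unset with Kernighan's n&=n-1 loop (one iteration per set bit) plus a closed-form unset count bit_length()-setbits.
import Mathlib
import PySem

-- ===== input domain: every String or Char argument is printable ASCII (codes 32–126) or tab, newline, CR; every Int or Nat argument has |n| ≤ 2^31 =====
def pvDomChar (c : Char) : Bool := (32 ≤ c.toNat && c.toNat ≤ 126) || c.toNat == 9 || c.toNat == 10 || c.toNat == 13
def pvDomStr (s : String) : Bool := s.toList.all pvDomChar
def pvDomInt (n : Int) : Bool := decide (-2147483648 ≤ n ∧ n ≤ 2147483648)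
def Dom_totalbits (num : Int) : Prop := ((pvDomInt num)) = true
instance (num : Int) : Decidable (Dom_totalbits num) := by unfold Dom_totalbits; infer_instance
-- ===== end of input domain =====

-- B replaces A's per-bit set/unset scan with Kernighan's clear-lowest-set-bit loop plus a
-- closed-form unset count (bit_length - setbits); same value on every int (alternative algorithm).

-- ===== PORT A =====
-- Python `n & 1` is PySem.Int.band n 1 and `n >> 1` is `n >>> (1 : Nat)` (both Python-exact).
-- Termination fact for A's while loop (cited by decreasing_by).
theorem pv_shiftRight_one_toNat_lt (n : Int) (h : 0 < n) : (n >>> (1 : Nat)).toNat < n.toNat := by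
  have hn : ((n.toNat : Int)) = n := Int.toNat_of_nonneg h.le
  have hs : ((n.toNat : Int) >>> (1 : Nat)) = ((n.toNat >>> 1 : Nat) : Int) := by
    simpa using Int.shiftRight_natCast n.toNat 1 -- exact cast of the shift
  rw [← hn, hs, Int.toNat_natCast, Nat.shiftRight_one]
  omega

def totalbitsLoop (n setbits unsetbits : Int) : Int × Int :=
  if 0 < n then
    if PySem.Int.band n 1 = 1 then
      totalbitsLoop (n >>> (1 : Nat)) (setbits + PySem.Int.band n 1) unsetbits
    else
      totalbitsLoop (n >>> (1 : Nat)) setbits (unsetbits + 1)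
  else (setbits, unsetbits)
termination_by n.toNat
decreasing_by all_goals exact pv_shiftRight_one_toNat_lt n (by assumption)

def totalbits (num : Int) : Int × Int :=
  let _count : Int := 0
  totalbitsLoop num 0 0

-- ===== PORT B =====
-- Termination fact for B's Kernighan loop (cited by decreasing_by).
theorem pv_band_pred_toNat_lt (n : Int) (h : 0 < n) : (PySem.Int.band n (n - 1)).toNat < n.toNat := by
  rw [PySem.Int.band_of_nonneg h.le (by omega), Int.toNat_natCast]
  have hle : n.toNat &&& (n - 1).toNat ≤ (n - 1).toNat := Nat.and_le_right
  omega

def kernLoop (n setbits : Int) : Int :=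
  if 0 < n then kernLoop (PySem.Int.band n (n - 1)) (setbits + 1) else setbits
termination_by n.toNat
decreasing_by exact pv_band_pred_toNat_lt n (by assumption)

-- Hand port of Python's int.bit_length, exact for the nonnegative ints B applies it to.
def pyBitLength (m : Nat) : Nat :=
  if m = 0 then 0 else pyBitLength (m / 2) + 1
termination_by m
decreasing_by exact Nat.div_lt_self (Nat.pos_of_ne_zero (by assumption)) one_lt_two

def totalbits_alt (num : Int) : Int × Int :=
  if num ≤ 0 then (0, 0)
  else
    let setbits := kernLoop num 0
    (setbits, (pyBitLength num.toNat : Int) - setbits)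

-- ===== PRECONDITION & SPEC =====
def Spec_totalbits (num : Int) (out : Int × Int) : Prop := out = totalbits_alt num
instance (num : Int) (out : Int × Int) : Decidable (Spec_totalbits num out) := by unfold Spec_totalbits; infer_instance

-- ===== CLAIM (what is proved, stated in full; the proofs are below) =====
def Claim_equal_totalbits : Prop := ∀ (num : Int), Dom_totalbits num → Spec_totalbits num (totalbits num)

-- ===== LEMMAS AND PROOFS =====
-- popcount spec used to characterise both loops
def pc (m : Nat) : Nat :=
  if m = 0 then 0 else pc (m / 2) + m % 2
termination_by m
decreasing_by exact Nat.div_lt_self (Nat.pos_of_ne_zero (by assumption)) one_lt_two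

theorem pc_zero : pc 0 = 0 := by simp [pc]

theorem pc_pos_eq (m : Nat) (h : 0 < m) : pc m = pc (m / 2) + m % 2 := by
  rw [pc]; simp [Nat.pos_iff_ne_zero.mp h]

theorem pc_two_mul (k : Nat) : pc (2 * k) = pc k := by
  rcases Nat.eq_zero_or_pos k with h | h
  · simp [h, pc_zero]
  · rw [pc_pos_eq (2 * k) (by omega)]
    have h1 : 2 * k / 2 = k := by omega
    have h2 : 2 * k % 2 = 0 := by omega
    rw [h1, h2]
    omega

theorem pc_two_mul_add_one (k : Nat) : pc (2 * k + 1) = pc k + 1 := by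
  rw [pc_pos_eq (2 * k + 1) (by omega)]
  have h1 : (2 * k + 1) / 2 = k := by omega
  have h2 : (2 * k + 1) % 2 = 1 := by omega
  rw [h1, h2]

theorem pyBitLength_zero : pyBitLength 0 = 0 := by simp [pyBitLength]

theorem pyBitLength_pos_eq (m : Nat) (h : 0 < m) : pyBitLength m = pyBitLength (m / 2) + 1 := by
  rw [pyBitLength]; simp [Nat.pos_iff_ne_zero.mp h]

theorem pc_le_bitLength (m : Nat) : pc m ≤ pyBitLength m := by
  induction m using Nat.strong_induction_on with
  | _ m ih =>
    rcases Nat.eq_zero_or_pos m with h | h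
    · simp [h, pc_zero, pyBitLength_zero]
    · rw [pc_pos_eq m h, pyBitLength_pos_eq m h]
      have := ih (m / 2) (Nat.div_lt_self h one_lt_two)
      omega

-- land recursion via bit decomposition
theorem land_rec (a b : Nat) :
    a &&& b = Nat.bit (decide (a % 2 = 1) && decide (b % 2 = 1)) (a / 2 &&& b / 2) := by
  conv_lhs =>
    rw [← Nat.bit_decide_mod_two_eq_one_shiftRight_one a,
        ← Nat.bit_decide_mod_two_eq_one_shiftRight_one b]
  rw [Nat.land_bit, Nat.shiftRight_one, Nat.shiftRight_one]

-- Kernighan's step: clearing the lowest set bit shrinks m and drops pc by one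
theorem kern_nat (m : Nat) (h : 0 < m) : m &&& (m - 1) < m ∧ pc (m &&& (m - 1)) + 1 = pc m := by
  induction m using Nat.strong_induction_on with
  | _ m ih =>
    rcases Nat.even_or_odd m with ⟨k, hk⟩ | ⟨k, hk⟩
    · -- m = 2k, k > 0
      have hkpos : 0 < k := by omega
      have hland : m &&& (m - 1) = 2 * (k &&& (k - 1)) := by
        rw [land_rec]
        have h1 : m % 2 = 0 := by omega
        have h2 : m / 2 = k := by omega
        have h3 : (m - 1) / 2 = k - 1 := by omega
        rw [h1, h2, h3]
        simp [Nat.bit_val]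
      obtain ⟨hlt, hpc⟩ := ih k (by omega) hkpos
      constructor
      · rw [hland]; omega
      · rw [hland, pc_two_mul]
        have : pc m = pc k := by
          have h2 : m = 2 * k := by omega
          rw [h2, pc_two_mul]
        omega
    · -- m = 2k + 1
      have hland : m &&& (m - 1) = 2 * k := by
        rw [land_rec]
        have h1 : m % 2 = 1 := by omega
        have h2 : (m - 1) % 2 = 0 := by omega
        have h3 : m / 2 = k := by omega
        have h4 : (m - 1) / 2 = k := by omega
        rw [h1, h2, h3, h4]
        simp [Nat.bit_val, Nat.and_self]
      constructor
      · rw [hland]; omega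
      · rw [hland, pc_two_mul]
        have : pc m = pc k + 1 := by rw [hk, pc_two_mul_add_one]
        omega

theorem natCast_shiftRight_one (m : Nat) : ((m : Int) >>> (1 : Nat)) = ((m / 2 : Nat) : Int) := by
  have := Int.shiftRight_natCast m 1
  simpa [Nat.shiftRight_one] using this

-- characterisation of A's loop
theorem loopA (m : Nat) : ∀ s u : Int,
    totalbitsLoop (m : Int) s u = (s + (pc m : Int), u + ((pyBitLength m - pc m : Nat) : Int)) := by
  induction m using Nat.strong_induction_on with
  | _ m ih =>
    intro s u
    rcases Nat.eq_zero_or_pos m with h | h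
    · subst h
      rw [totalbitsLoop]
      simp [pc_zero, pyBitLength_zero]
    · rw [totalbitsLoop]
      have hpos : (0 : Int) < (m : Int) := by exact_mod_cast h
      have hband : PySem.Int.band (m : Int) 1 = ((m % 2 : Nat) : Int) := by
        have : PySem.Int.band (m : Int) ((1 : Nat) : Int) = ((m &&& 1 : Nat) : Int) :=
          PySem.Int.band_natCast m 1
        simpa [Nat.and_one_is_mod] using this
      have ihh := ih (m / 2) (Nat.div_lt_self h one_lt_two)
      have hple := pc_le_bitLength (m / 2)
      rcases Nat.even_or_odd m with ⟨k, hk⟩ | ⟨k, hk⟩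
      · -- even: unset branch
        have hm2 : m % 2 = 0 := by omega
        have hcond : ¬ (PySem.Int.band (m : Int) 1 = 1) := by
          rw [hband, hm2]; decide
        rw [if_pos hpos, if_neg hcond, natCast_shiftRight_one, ihh]
        have hpc : pc m = pc (m / 2) := by rw [pc_pos_eq m h, hm2]; omega
        have hbl : pyBitLength m = pyBitLength (m / 2) + 1 := pyBitLength_pos_eq m h
        rw [hpc, hbl, Prod.mk.injEq]
        exact ⟨by omega, by omega⟩
      · -- odd: set branch
        have hm2 : m % 2 = 1 := by omega
        have hcond : PySem.Int.band (m : Int) 1 = 1 := by rw [hband, hm2]; rfl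
        rw [if_pos hpos, if_pos hcond, hband, hm2, natCast_shiftRight_one, ihh]
        have hpc : pc m = pc (m / 2) + 1 := by rw [pc_pos_eq m h, hm2]
        have hbl : pyBitLength m = pyBitLength (m / 2) + 1 := pyBitLength_pos_eq m h
        rw [hpc, hbl, Prod.mk.injEq]
        exact ⟨by omega, by omega⟩

-- characterisation of B's Kernighan loop
theorem kernLoop_eq (m : Nat) : ∀ c : Int, kernLoop (m : Int) c = c + (pc m : Int) := by
  induction m using Nat.strong_induction_on with
  | _ m ih =>
    intro c
    rcases Nat.eq_zero_or_pos m with h | h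
    · subst h
      rw [kernLoop]
      simp [pc_zero]
    · rw [kernLoop]
      have hpos : (0 : Int) < (m : Int) := by exact_mod_cast h
      have hsub : ((m : Int) - 1) = ((m - 1 : Nat) : Int) := by push_cast [h]; ring
      have hband : PySem.Int.band (m : Int) ((m : Int) - 1) = ((m &&& (m - 1) : Nat) : Int) := by
        rw [hsub]; exact PySem.Int.band_natCast m (m - 1)
      obtain ⟨hlt, hpc⟩ := kern_nat m h
      rw [if_pos hpos, hband, ih (m &&& (m - 1)) hlt]
      have : ((pc (m &&& (m - 1)) : Int)) = (pc m : Int) - 1 := by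
        omega
      rw [this]; ring

-- ===== VERDICT (by name: the statement is the Claim_ definition above) =====
theorem totalbits_spec : Claim_equal_totalbits := by
  unfold Claim_equal_totalbits
  intro num _
  unfold Spec_totalbits totalbits totalbits_alt
  by_cases h : num ≤ 0
  · rw [totalbitsLoop, if_neg (by omega)]
    simp [h]
  · have hpos : 0 < num := by omega
    obtain ⟨m, rfl⟩ : ∃ m : Nat, num = (m : Int) :=
      ⟨num.toNat, (Int.toNat_of_nonneg hpos.le).symm⟩
    rw [if_neg h, loopA, kernLoop_eq, Int.toNat_natCast, Prod.mk.injEq]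
    have hple := pc_le_bitLength m
    exact ⟨by omega, by omega⟩
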